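-- pv_equiv track=rewrite | github.com/ademcodesproducts/pilot_data_contamination | scripts/05_validate_and_report.py | _filter_and_dedup_c_lex
-- ===== SOURCE A (Python) =====
-- def _filter_and_dedup_c_lex(items, min_ngrams):
--     """Filter by shared n-gram count, deduplicate by math500_id (keep max overlap)."""
--     filtered = [item for item in items if item["n_shared_ngrams"] >= min_ngrams]
--     seen = set()
--     unique = []
--     for item in sorted(filtered, key=lambda x: -x["n_shared_ngrams"]):
--         if item["math500_id"] not in seen:
--             unique.append(item)
--             seen.add(item["math500_id"])
--     return unique
-- ===== SOURCE B (Python) =====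
-- def _filter_and_dedup_c_lex(items, min_ngrams):
--     """Filter by shared n-gram count, deduplicate by math500_id (keep max overlap)."""
--     best = {}
--     for idx, item in enumerate(items):
--         n = item["n_shared_ngrams"]
--         if n < min_ngrams:
--             continue
--         cur = best.get(item["math500_id"])
--         if cur is None or n > cur[0]["n_shared_ngrams"]:
--             best[item["math500_id"]] = (item, idx)
--     return [item for item, idx in sorted(best.values(), key=lambda p: (-p[0]["n_shared_ngrams"], p[1]))]
-- ===== Notes on version B (the rewrite author's own statement) =====
-- stated objective: faster
-- what changed: Replaces A's full stable sort of all filtered items followed by a seen-set dedup scan with a single pass that keeps only the best (max overlap, first occurrence) item per math500_id in a dict, then sorts just the per-id winners by (-overlap, original index).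
import Mathlib
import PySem

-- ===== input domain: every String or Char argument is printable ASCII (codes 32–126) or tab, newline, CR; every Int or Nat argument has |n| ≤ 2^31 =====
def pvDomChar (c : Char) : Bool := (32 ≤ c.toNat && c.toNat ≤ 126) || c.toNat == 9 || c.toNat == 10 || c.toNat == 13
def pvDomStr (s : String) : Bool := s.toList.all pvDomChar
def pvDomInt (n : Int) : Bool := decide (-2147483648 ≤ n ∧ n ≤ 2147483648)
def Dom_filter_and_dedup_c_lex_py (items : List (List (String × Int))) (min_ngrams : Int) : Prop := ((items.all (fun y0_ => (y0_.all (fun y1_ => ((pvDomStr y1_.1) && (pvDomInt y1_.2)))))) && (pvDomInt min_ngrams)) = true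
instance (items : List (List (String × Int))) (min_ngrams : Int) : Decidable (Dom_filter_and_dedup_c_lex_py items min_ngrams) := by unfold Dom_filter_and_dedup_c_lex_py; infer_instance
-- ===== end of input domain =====

-- B builds a best-item-per-id dict in one pass and sorts only the per-id winners by (-overlap, original index),
-- instead of A's stable sort of all filtered items followed by a seen-set dedup scan.

-- ===== PORT A =====
-- shared accessors for the two dict fields both Pythons read (item["n_shared_ngrams"], item["math500_id"])
def pvN (x : List (String × Int)) : Int := (PySem.Dict.mk x).getD "n_shared_ngrams" 0
def pvId (x : List (String × Int)) : Int := (PySem.Dict.mk x).getD "math500_id" 0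

def filter_and_dedup_c_lex_py (items : List (List (String × Int))) (min_ngrams : Int) : List (List (String × Int)) :=
  let filtered := items.filter (fun item => decide (pvN item ≥ min_ngrams))
  let r := (PySem.List.sorted filtered (fun x => -(pvN x)) false).foldl
    (fun (st : PySem.Set Int × List (List (String × Int))) item =>
      if ¬ (PySem.Set.contains st.1 (pvId item) = true) then
        (PySem.Set.add st.1 (pvId item), st.2 ++ [item])
      else st)
    (PySem.Set.empty, [])
  r.2

-- ===== PORT B =====
def filter_and_dedup_c_lex_py_alt (items : List (List (String × Int))) (min_ngrams : Int) : List (List (String × Int)) :=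
  let best := (PySem.List.enumerate items 0).foldl
    (fun (best : PySem.Dict Int (List (String × Int) × Int)) p =>
      let n := pvN p.2
      if n < min_ngrams then best
      else
        match PySem.Dict.get? best (pvId p.2) with
        | none => PySem.Dict.insert best (pvId p.2) (p.2, p.1)
        | some cur => if n > pvN cur.1 then PySem.Dict.insert best (pvId p.2) (p.2, p.1) else best)
    PySem.Dict.empty
  (PySem.List.sorted2 (PySem.Dict.values best) (fun q => -(pvN q.1)) (fun q => q.2) false).map (fun q => q.1)

-- ===== PRECONDITION & SPEC =====
-- Pre_ excludes only inputs that are not valid Python dicts (duplicate keys in an item) and inputs on which A raises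
-- KeyError: an item missing "n_shared_ngrams", or an item that passes the filter but is missing "math500_id".
def Pre_filter_and_dedup_c_lex_py (items : List (List (String × Int))) (min_ngrams : Int) : Prop :=
  ∀ item ∈ items, (item.map Prod.fst).Nodup ∧
    PySem.Dict.contains (PySem.Dict.mk item) "n_shared_ngrams" = true ∧
    (pvN item ≥ min_ngrams → PySem.Dict.contains (PySem.Dict.mk item) "math500_id" = true)
instance (items : List (List (String × Int))) (min_ngrams : Int) : Decidable (Pre_filter_and_dedup_c_lex_py items min_ngrams) := by unfold Pre_filter_and_dedup_c_lex_py; infer_instance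

def pvWitness_filter_and_dedup_c_lex_py : (List (List (String × Int))) × Int :=
  ([[("n_shared_ngrams", 3), ("math500_id", 1)],
    [("n_shared_ngrams", 5), ("math500_id", 1)],
    [("n_shared_ngrams", 5), ("math500_id", 2)],
    [("n_shared_ngrams", 0), ("math500_id", 2)]], 1)

def Spec_filter_and_dedup_c_lex_py (items : List (List (String × Int))) (min_ngrams : Int) (out : List (List (String × Int))) : Prop := out = filter_and_dedup_c_lex_py_alt items min_ngrams
instance (items : List (List (String × Int))) (min_ngrams : Int) (out : List (List (String × Int))) : Decidable (Spec_filter_and_dedup_c_lex_py items min_ngrams out) := by unfold Spec_filter_and_dedup_c_lex_py; infer_instance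

-- ===== CLAIM (what is proved, stated in full; the proofs are below) =====
def Claim_equal_filter_and_dedup_c_lex_py : Prop := ∀ (items : List (List (String × Int))) (min_ngrams : Int), Dom_filter_and_dedup_c_lex_py items min_ngrams → Pre_filter_and_dedup_c_lex_py items min_ngrams → Spec_filter_and_dedup_c_lex_py items min_ngrams (filter_and_dedup_c_lex_py items min_ngrams)

-- ===== LEMMAS AND PROOFS =====


-- ---- proof-side abbreviations ----
def pvPass (min_ngrams : Int) (x : List (String × Int)) : Bool := decide (pvN x ≥ min_ngrams)

-- filtered items paired with their original index (item, idx)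
def pvW (items : List (List (String × Int))) (m : Int) : List ((List (String × Int)) × Int) :=
  ((PySem.List.enumerate items 0).filter (fun p => pvPass m p.2)).map (fun p => (p.2, p.1))

-- the strict lexicographic order on (-overlap, index), as B's sort comparator and as a Prop
def pvLb (q r : (List (String × Int)) × Int) : Bool :=
  decide (-(pvN q.1) < -(pvN r.1)) || (!(decide (-(pvN r.1) < -(pvN q.1))) && decide (q.2 < r.2))
def pvLt (q r : (List (String × Int)) × Int) : Prop :=
  pvN r.1 < pvN q.1 ∨ (pvN q.1 = pvN r.1 ∧ q.2 < r.2)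
def pvBA (a b : List (String × Int)) : Bool := decide (-(pvN a) < -(pvN b))

def pvT (items : List (List (String × Int))) (m : Int) : List ((List (String × Int)) × Int) :=
  PySem.List.sorted2 (pvW items m) (fun q => -(pvN q.1)) (fun q => q.2) false

def pvDedup (seen : PySem.Set Int) : List (List (String × Int)) → List (List (String × Int))
  | [] => []
  | x :: t => if PySem.Set.contains seen (pvId x) = true then pvDedup seen t
              else x :: pvDedup (PySem.Set.add seen (pvId x)) t

def pvDedupP (seen : PySem.Set Int) :
    List ((List (String × Int)) × Int) → List ((List (String × Int)) × Int)
  | [] => []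
  | q :: t => if PySem.Set.contains seen (pvId q.1) = true then pvDedupP seen t
              else q :: pvDedupP (PySem.Set.add seen (pvId q.1)) t

theorem pvDedup_nil (seen : PySem.Set Int) : pvDedup seen [] = [] := rfl
theorem pvDedup_cons (seen : PySem.Set Int) (x : List (String × Int)) (t : List (List (String × Int))) :
    pvDedup seen (x :: t) = if PySem.Set.contains seen (pvId x) = true then pvDedup seen t
      else x :: pvDedup (PySem.Set.add seen (pvId x)) t := rfl
theorem pvDedupP_nil (seen : PySem.Set Int) : pvDedupP seen [] = [] := rfl
theorem pvDedupP_cons (seen : PySem.Set Int) (q : (List (String × Int)) × Int)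
    (t : List ((List (String × Int)) × Int)) :
    pvDedupP seen (q :: t) = if PySem.Set.contains seen (pvId q.1) = true then pvDedupP seen t
      else q :: pvDedupP (PySem.Set.add seen (pvId q.1)) t := rfl

def pvStep (m : Int) (d : PySem.Dict Int ((List (String × Int)) × Int)) (p : Int × (List (String × Int))) :
    PySem.Dict Int ((List (String × Int)) × Int) :=
  let n := pvN p.2
  if n < m then d
  else
    match PySem.Dict.get? d (pvId p.2) with
    | none => PySem.Dict.insert d (pvId p.2) (p.2, p.1)
    | some cur => if n > pvN cur.1 then PySem.Dict.insert d (pvId p.2) (p.2, p.1) else d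

def pvBest (items : List (List (String × Int))) (m : Int) : PySem.Dict Int ((List (String × Int)) × Int) :=
  (PySem.List.enumerate items 0).foldl (pvStep m) PySem.Dict.empty

def pvGood (items : List (List (String × Int))) (m : Int) (q : (List (String × Int)) × Int) : Prop :=
  q ∈ pvW items m ∧ ∀ r ∈ pvW items m, pvId r.1 = pvId q.1 → q = r ∨ pvLt q r

-- ---- order facts ----
theorem pvLb_iff (q r : (List (String × Int)) × Int) : pvLb q r = true ↔ pvLt q r := by
  simp [pvLb, pvLt]; omega

theorem pvLt_trans {a b c : (List (String × Int)) × Int} (h1 : pvLt a b) (h2 : pvLt b c) : pvLt a c := by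
  simp only [pvLt] at *; omega

theorem pvLt_asymm {a b : (List (String × Int)) × Int} (h1 : pvLt a b) (h2 : pvLt b a) : False := by
  simp only [pvLt] at *; omega

theorem pvLt_total {a b : (List (String × Int)) × Int} (h : a.2 ≠ b.2) : pvLt a b ∨ pvLt b a := by
  simp only [pvLt]; omega

-- ---- generic insertBy facts ----
theorem insertBy_perm {α : Type} (b : α → α → Bool) (x : α) (l : List α) :
    (PySem.List.insertBy b x l).Perm (x :: l) := by
  induction l with
  | nil => simp [PySem.List.insertBy]
  | cons y ys ih =>
    simp only [PySem.List.insertBy]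
    split
    · exact List.Perm.refl _
    · exact (ih.cons y).trans (List.Perm.swap x y ys)

theorem insertBy_pairwise {x : (List (String × Int)) × Int} {l : List ((List (String × Int)) × Int)}
    (hp : l.Pairwise pvLt) (hx : ∀ y ∈ l, y.2 ≠ x.2) :
    (PySem.List.insertBy pvLb x l).Pairwise pvLt := by
  induction l with
  | nil => simp [PySem.List.insertBy]
  | cons y ys ih =>
    rcases List.pairwise_cons.mp hp with ⟨hy, hys⟩
    simp only [PySem.List.insertBy]
    split
    · rename_i hb
      have hxy : pvLt x y := (pvLb_iff _ _).mp hb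
      refine List.pairwise_cons.mpr ⟨?_, hp⟩
      intro z hz
      rcases List.mem_cons.mp hz with rfl | hz
      · exact hxy
      · exact pvLt_trans hxy (hy z hz)
    · rename_i hb
      have hnxy : ¬ pvLt x y := fun h => hb ((pvLb_iff _ _).mpr h)
      have hyx : pvLt y x := by
        rcases pvLt_total (hx y (by simp)) with h | h
        · exact h
        · exact absurd h hnxy
      refine List.pairwise_cons.mpr ⟨?_, ih hys (fun z hz => hx z (by simp [hz]))⟩
      intro z hz
      rcases (PySem.List.mem_insertBy _ _ _ _).mp hz with rfl | hz
      · exact hyx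
      · exact hy z hz

theorem foldl_insertBy_inv (xs : List ((List (String × Int)) × Int)) :
    ∀ (acc : List ((List (String × Int)) × Int)), acc.Pairwise pvLt →
    (((acc ++ xs).map Prod.snd).Nodup) →
    (xs.foldl (fun a x => PySem.List.insertBy pvLb x a) acc).Pairwise pvLt := by
  induction xs with
  | nil => intro acc h _; exact h
  | cons x t ih =>
    intro acc hacc hnd
    simp only [List.foldl_cons]
    have hperm : (PySem.List.insertBy pvLb x acc).Perm (x :: acc) := insertBy_perm _ _ _
    have hxne : ∀ y ∈ acc, y.2 ≠ x.2 := by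
      intro y hy he
      rw [List.map_append] at hnd
      rcases List.nodup_append.mp hnd with ⟨-, -, h3⟩
      exact h3 y.2 (List.mem_map_of_mem (f := Prod.snd) hy) x.2 (by simp) he
    have hp2 : (PySem.List.insertBy pvLb x acc ++ t).Perm (acc ++ x :: t) :=
      (hperm.append_right t).trans (List.perm_middle).symm
    refine ih _ (insertBy_pairwise hacc hxne) ?_
    exact ((hp2.map Prod.snd).nodup_iff).mpr hnd

-- sorted2 with B's keys is the insertBy fold with pvLb
theorem sorted2_foldl (xs : List ((List (String × Int)) × Int)) :
    PySem.List.sorted2 xs (fun q => -(pvN q.1)) (fun q => q.2) false =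
      xs.foldl (fun a x => PySem.List.insertBy pvLb x a) [] := rfl

theorem sortedA_foldl (xs : List (List (String × Int))) :
    PySem.List.sorted xs (fun x => -(pvN x)) false =
      xs.foldl (fun a x => PySem.List.insertBy pvBA x a) [] := rfl

theorem sorted2_pairwise' (xs : List ((List (String × Int)) × Int))
    (h : (xs.map Prod.snd).Nodup) :
    (PySem.List.sorted2 xs (fun q => -(pvN q.1)) (fun q => q.2) false).Pairwise pvLt := by
  rw [sorted2_foldl]
  exact foldl_insertBy_inv xs [] (by simp) (by simpa using h)

-- ---- stability: A's sorted list is the first components of the index-refined sort ----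
theorem mapfst_insertBy (x : List (String × Int)) (i : Int)
    (l : List ((List (String × Int)) × Int)) (h : ∀ q ∈ l, q.2 < i) :
    (PySem.List.insertBy pvLb (x, i) l).map Prod.fst =
      PySem.List.insertBy pvBA x (l.map Prod.fst) := by
  induction l with
  | nil => simp [PySem.List.insertBy]
  | cons y ys ih =>
    have hlb : pvLb (x, i) y = pvBA x y.1 := by
      have : y.2 < i := h y (by simp)
      simp [pvLb, pvBA]; omega
    simp only [PySem.List.insertBy, List.map_cons, hlb]
    split
    · simp
    · simpa using ih (fun q hq => h q (by simp [hq]))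

theorem pvW_append (xs : List (List (String × Int))) (x : List (String × Int)) (m : Int) :
    pvW (xs ++ [x]) m = pvW xs m ++ (if pvPass m x then [(x, (xs.length : Int))] else []) := by
  simp only [pvW, PySem.List.enumerate_append, List.filter_append, List.map_append]
  congr 1
  simp only [PySem.List.enumerate, List.filter]
  split <;> simp_all

theorem pvW_idx_lt (items : List (List (String × Int))) (m : Int) :
    ∀ q ∈ pvW items m, q.2 < (items.length : Int) := by
  intro q hq
  simp only [pvW, List.mem_map, List.mem_filter] at hq
  rcases hq with ⟨p, ⟨hp, _⟩, rfl⟩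
  rcases (PySem.List.mem_enumerate_iff _ _ _).mp hp with ⟨k, hk, rfl⟩
  simpa using (by exact_mod_cast hk : (k : Int) < (items.length : Int))

theorem pvW_snd_nodup (items : List (List (String × Int))) (m : Int) :
    ((pvW items m).map Prod.snd).Nodup := by
  have h1 : ((PySem.List.enumerate items 0).filter (fun p => pvPass m p.2)).Pairwise
      (fun p q => p.1 < q.1) := (PySem.List.pairwise_lt_enumerate items 0).filter _
  have h2 : (pvW items m).Pairwise (fun a b => a.2 < b.2) := by
    simpa [pvW, List.pairwise_map] using h1
  have := h2.map (f := Prod.snd) (S := fun a b => a ≠ b) (by intro a b h; exact ne_of_lt h)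
  simpa [List.Nodup]

theorem map_fst_T (items : List (List (String × Int))) (m : Int) :
    (pvT items m).map Prod.fst =
      PySem.List.sorted (items.filter (pvPass m)) (fun x => -(pvN x)) false := by
  induction items using List.reverseRecOn with
  | nil => rfl
  | append_singleton xs x ih =>
    by_cases hp : pvPass m x
    · have hidx : ∀ q ∈ pvT xs m, q.2 < (xs.length : Int) := fun q hq =>
        pvW_idx_lt xs m q ((PySem.List.sorted2_perm _ _ _ _).mem_iff.mp hq)
      have h1 : pvT (xs ++ [x]) m =
          PySem.List.insertBy pvLb (x, (xs.length : Int)) (pvT xs m) := by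
        rw [pvT, pvW_append, if_pos hp, sorted2_foldl, List.foldl_append]
        simp only [List.foldl_cons, List.foldl_nil]
        rw [pvT, sorted2_foldl]
      have h2 : List.filter (pvPass m) (xs ++ [x]) = List.filter (pvPass m) xs ++ [x] := by
        rw [List.filter_append]; simp [hp]
      rw [h1, mapfst_insertBy x _ _ hidx, ih, h2]
      rw [sortedA_foldl (List.filter (pvPass m) xs ++ [x]), List.foldl_append]
      simp only [List.foldl_cons, List.foldl_nil]
      rw [← sortedA_foldl]
    · have h1 : pvT (xs ++ [x]) m = pvT xs m := by
        rw [pvT, pvW_append, if_neg hp, List.append_nil, pvT]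
      have h2 : List.filter (pvPass m) (xs ++ [x]) = List.filter (pvPass m) xs := by
        rw [List.filter_append]; simp [hp]
      rw [h1, h2, ih]

-- ---- A's fold is the dedup scan ----
theorem A_fold (l : List (List (String × Int))) :
    ∀ (seen : PySem.Set Int) (acc : List (List (String × Int))),
    (l.foldl
      (fun (st : PySem.Set Int × List (List (String × Int))) item =>
        if ¬ (PySem.Set.contains st.1 (pvId item) = true) then
          (PySem.Set.add st.1 (pvId item), st.2 ++ [item])
        else st)
      (seen, acc)).2 = acc ++ pvDedup seen l := by
  induction l with
  | nil => intro seen acc; simp [pvDedup_nil]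
  | cons x t ih =>
    intro seen acc
    simp only [List.foldl_cons]
    rw [pvDedup_cons]
    by_cases h : PySem.Set.contains seen (pvId x) = true
    · rw [if_neg (not_not_intro h), if_pos h, ih]
    · rw [if_pos h, if_neg h, ih]
      simp

theorem dedup_map (T : List ((List (String × Int)) × Int)) :
    ∀ seen, pvDedup seen (T.map Prod.fst) = (pvDedupP seen T).map Prod.fst := by
  induction T with
  | nil => intro seen; simp [pvDedup_nil, pvDedupP_nil]
  | cons q t ih =>
    intro seen
    rw [List.map_cons, pvDedup_cons, pvDedupP_cons]
    by_cases h : PySem.Set.contains seen (pvId q.1) = true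
    · rw [if_pos h, if_pos h, ih]
    · rw [if_neg h, if_neg h, List.map_cons, ih]

theorem dedupP_sublist (T : List ((List (String × Int)) × Int)) :
    ∀ seen, (pvDedupP seen T).Sublist T := by
  induction T with
  | nil => intro seen; simp [pvDedupP_nil]
  | cons q t ih =>
    intro seen
    rw [pvDedupP_cons]
    split
    · exact (ih seen).cons q
    · exact (ih _).cons₂ q

theorem contains_set_iff (s : PySem.Set Int) (x : Int) :
    PySem.Set.contains s x = true ↔ x ∈ s := by
  simp [PySem.Set.contains]

theorem mem_add_set (s : PySem.Set Int) (x y : Int) :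
    y ∈ PySem.Set.add s x ↔ y ∈ s ∨ y = x := by
  simp only [PySem.Set.add]
  split
  · rename_i h
    rw [contains_set_iff] at h
    constructor
    · exact fun hy => Or.inl hy
    · rintro (hy | rfl) <;> assumption
  · simp [or_comm]

theorem mem_dedupP (T : List ((List (String × Int)) × Int)) :
    ∀ (seen : PySem.Set Int), T.Pairwise pvLt →
    ∀ q, (q ∈ pvDedupP seen T ↔
      q ∈ T ∧ pvId q.1 ∉ seen ∧ ∀ r ∈ T, pvId r.1 = pvId q.1 → q = r ∨ pvLt q r) := by
  induction T with
  | nil => intro seen _ q; simp [pvDedupP_nil]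
  | cons x t ih =>
    intro seen hp q
    rcases List.pairwise_cons.mp hp with ⟨hx, ht⟩
    rw [pvDedupP_cons]
    by_cases hc : PySem.Set.contains seen (pvId x.1) = true
    · rw [if_pos hc, ih seen ht q, contains_set_iff] at *
      constructor
      · rintro ⟨hqt, hqs, hmin⟩
        refine ⟨List.mem_cons_of_mem x hqt, hqs, ?_⟩
        intro r hr hid
        rcases List.mem_cons.mp hr with rfl | hr
        · exact absurd (hid ▸ hc) hqs
        · exact hmin r hr hid
      · rintro ⟨hqm, hqs, hmin⟩
        rcases List.mem_cons.mp hqm with rfl | hqt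
        · exact absurd hc hqs
        · exact ⟨hqt, hqs, fun r hr hid => hmin r (List.mem_cons_of_mem x hr) hid⟩
    · rw [if_neg hc]
      rw [contains_set_iff] at hc
      constructor
      · intro hq
        rcases List.mem_cons.mp hq with rfl | hq
        · refine ⟨List.mem_cons_self, hc, ?_⟩
          intro r hr hid
          rcases List.mem_cons.mp hr with rfl | hr
          · exact Or.inl rfl
          · exact Or.inr (hx r hr)
        · rcases (ih _ ht q).mp hq with ⟨hqt, hqs, hmin⟩
          rw [mem_add_set] at hqs
          push Not at hqs
          refine ⟨List.mem_cons_of_mem x hqt, hqs.1, ?_⟩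
          intro r hr hid
          rcases List.mem_cons.mp hr with rfl | hr
          · exact absurd hid.symm hqs.2
          · exact hmin r hr hid
      · rintro ⟨hqm, hqs, hmin⟩
        rcases List.mem_cons.mp hqm with rfl | hqt
        · exact List.mem_cons_self
        · refine List.mem_cons_of_mem x ((ih _ ht q).mpr ⟨hqt, ?_,
            fun r hr hid => hmin r (List.mem_cons_of_mem x hr) hid⟩)
          rw [mem_add_set]
          push Not
          refine ⟨hqs, ?_⟩
          intro hid
          rcases hmin x List.mem_cons_self hid.symm with rfl | hlt
          · exact pvLt_asymm (hx q hqt) (hx q hqt)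
          · exact pvLt_asymm (hx q hqt) hlt

theorem map_nodup_inj {α β : Type} (f : α → β) (l : List α) (h : (l.map f).Nodup) :
    ∀ a ∈ l, ∀ b ∈ l, f a = f b → a = b := by
  induction l with
  | nil => simp
  | cons x t ih =>
    simp only [List.map_cons, List.nodup_cons] at h
    intro a ha b hb hf
    rcases List.mem_cons.mp ha with rfl | ha' <;> rcases List.mem_cons.mp hb with rfl | hb'
    · rfl
    · exact absurd (hf.symm ▸ List.mem_map_of_mem hb') h.1
    · exact absurd (hf ▸ List.mem_map_of_mem ha') h.1
    · exact ih h.2 _ ha' _ hb' hf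

theorem eq_of_perm_pairwise :
    ∀ (l₁ l₂ : List ((List (String × Int)) × Int)), l₁.Perm l₂ →
    l₁.Pairwise pvLt → l₂.Pairwise pvLt → l₁ = l₂ := by
  intro l₁
  induction l₁ with
  | nil => intro l₂ hp _ _; simpa using hp.symm.eq_nil ▸ rfl
  | cons a t ih =>
    intro l₂ hp h1 h2
    cases l₂ with
    | nil => exact absurd hp.symm (by simp)
    | cons b t₂ =>
      rcases List.pairwise_cons.mp h1 with ⟨ha, ht⟩
      rcases List.pairwise_cons.mp h2 with ⟨hb, ht₂⟩
      have hab : a = b := by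
        have hma : a ∈ b :: t₂ := hp.mem_iff.mp (by simp)
        rcases List.mem_cons.mp hma with rfl | hma
        · rfl
        · have hmb : b ∈ a :: t := hp.mem_iff.mpr (by simp)
          rcases List.mem_cons.mp hmb with rfl | hmb
          · rfl
          · exact absurd (hb a hma) (fun h => pvLt_asymm (ha b hmb) h)
      subst hab
      have := ih t₂ (hp.cons_inv) ht ht₂
      rw [this]

-- ---- the best-dict invariant ----
theorem pvPass_true {m : Int} {x : List (String × Int)} (h : ¬ pvN x < m) : pvPass m x = true := by
  simp [pvPass]; omega

theorem pvPass_false {m : Int} {x : List (String × Int)} (h : pvN x < m) : pvPass m x = false := by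
  simp [pvPass]; omega

theorem best_append (xs : List (List (String × Int))) (x : List (String × Int)) (m : Int) :
    pvBest (xs ++ [x]) m = pvStep m (pvBest xs m) ((xs.length : Int), x) := by
  rw [pvBest, PySem.List.enumerate_append, List.foldl_append, pvBest]
  simp [PySem.List.enumerate]

theorem best_inv (m : Int) (items : List (List (String × Int))) :
    (pvBest items m).keys.Nodup ∧
    (∀ k q, (pvBest items m).get? k = some q ↔ (pvId q.1 = k ∧ pvGood items m q)) ∧
    (∀ k, (pvBest items m).get? k = none ↔ ∀ r ∈ pvW items m, pvId r.1 ≠ k) := by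
  induction items using List.reverseRecOn with
  | nil =>
    refine ⟨PySem.Dict.nodup_keys_empty, ?_, ?_⟩
    · intro k q
      rw [show pvBest [] m = PySem.Dict.empty from rfl, PySem.Dict.get?_empty]
      simp [pvGood, pvW, PySem.List.enumerate]
    · intro k
      rw [show pvBest [] m = PySem.Dict.empty from rfl, PySem.Dict.get?_empty]
      simp [pvW, PySem.List.enumerate]
  | append_singleton xs x ih =>
    rcases ih with ⟨hnd, hsome, hnone⟩
    simp only [pvGood] at hsome
    rw [best_append]
    by_cases hlt : pvN x < m
    · have hW : pvW (xs ++ [x]) m = pvW xs m := by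
        rw [pvW_append, pvPass_false hlt]; simp
      have hstep : pvStep m (pvBest xs m) ((xs.length : Int), x) = pvBest xs m := by
        simp [pvStep, hlt]
      rw [hstep]
      simp only [pvGood, hW]
      exact ⟨hnd, hsome, hnone⟩
    · have hW : pvW (xs ++ [x]) m = pvW xs m ++ [(x, (xs.length : Int))] := by
      -- appended item passes the filter
        rw [pvW_append, pvPass_true hlt]; simp
      have hidxW : ∀ q ∈ pvW xs m, q.2 < (xs.length : Int) := pvW_idx_lt xs m
      simp only [pvGood, hW]
      rcases hc : PySem.Dict.get? (pvBest xs m) (pvId x) with _ | cur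
      · -- no previous entry for this id
        have hstep : pvStep m (pvBest xs m) ((xs.length : Int), x) =
            PySem.Dict.insert (pvBest xs m) (pvId x) (x, (xs.length : Int)) := by
          simp [pvStep, hlt, hc]
        have hempty : ∀ r ∈ pvW xs m, pvId r.1 ≠ pvId x := (hnone (pvId x)).mp hc
        rw [hstep]
        refine ⟨PySem.Dict.nodup_keys_insert _ _ _ hnd, ?_, ?_⟩
        · intro k q
          rw [PySem.Dict.get?_insert]
          by_cases hk : k = pvId x
          · subst hk
            rw [if_pos rfl]
            constructor
            · intro hq
              have hq' : q = (x, (xs.length : Int)) := by injection hq with h; exact h.symm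
              subst hq'
              refine ⟨rfl, by simp, ?_⟩
              intro r hr hid
              rcases List.mem_append.mp hr with hr | hr
              · exact absurd hid (hempty r hr)
              · exact Or.inl (List.mem_singleton.mp hr).symm
            · rintro ⟨hid, hmem, hmin⟩
              rcases List.mem_append.mp hmem with hq | hq
              · exact absurd hid (hempty q hq)
              · rw [List.mem_singleton.mp hq]
          · rw [if_neg hk, hsome k q]
            constructor
            · rintro ⟨hid, hmem, hmin⟩
              refine ⟨hid, List.mem_append_left _ hmem, ?_⟩
              intro r hr hid'
              rcases List.mem_append.mp hr with hr | hr
              · exact hmin r hr hid'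
              · rw [List.mem_singleton.mp hr] at hid'
                exact absurd (hid.symm.trans hid'.symm) hk
            · rintro ⟨hid, hmem, hmin⟩
              rcases List.mem_append.mp hmem with hq | hq
              · exact ⟨hid, hq, fun r hr hid' => hmin r (List.mem_append_left _ hr) hid'⟩
              · rw [List.mem_singleton.mp hq] at hid
                exact absurd hid.symm hk
        · intro k
          rw [PySem.Dict.get?_insert]
          by_cases hk : k = pvId x
          · subst hk
            rw [if_pos rfl]
            constructor
            · intro h; cases h
            · intro h
              exact absurd rfl (h (x, (xs.length : Int)) (List.mem_append_right _ List.mem_cons_self))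
          · rw [if_neg hk, hnone k]
            constructor
            · intro h r hr
              rcases List.mem_append.mp hr with hr | hr
              · exact h r hr
              · rw [List.mem_singleton.mp hr]
                exact fun he => hk he.symm
            · intro h r hr
              exact h r (List.mem_append_left _ hr)
      · -- existing entry cur for this id
        rcases (hsome (pvId x) cur).mp hc with ⟨hcid, hcmem, hcmin⟩
        have hcl : cur.2 < (xs.length : Int) := hidxW cur hcmem
        by_cases hgt : pvN x > pvN cur.1
        · have hstep : pvStep m (pvBest xs m) ((xs.length : Int), x) =
              PySem.Dict.insert (pvBest xs m) (pvId x) (x, (xs.length : Int)) := by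
            simp [pvStep, hlt, hc, hgt]
          have hwlt : ∀ r ∈ pvW xs m, pvId r.1 = pvId x →
              pvLt ((x, (xs.length : Int)) : (List (String × Int)) × Int) r := by
            intro r hr hid
            rcases hcmin r hr (hid.trans hcid.symm) with rfl | hlt'
            · exact Or.inl hgt
            · exact pvLt_trans (Or.inl hgt) hlt'
          rw [hstep]
          refine ⟨PySem.Dict.nodup_keys_insert _ _ _ hnd, ?_, ?_⟩
          · intro k q
            rw [PySem.Dict.get?_insert]
            by_cases hk : k = pvId x
            · subst hk
              rw [if_pos rfl]
              constructor
              · intro hq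
                have hq' : q = (x, (xs.length : Int)) := by injection hq with h; exact h.symm
                subst hq'
                refine ⟨rfl, by simp, ?_⟩
                intro r hr hid
                rcases List.mem_append.mp hr with hr | hr
                · exact Or.inr (hwlt r hr hid)
                · exact Or.inl (List.mem_singleton.mp hr).symm
              · rintro ⟨hid, hmem, hmin⟩
                rcases List.mem_append.mp hmem with hq | hq
                · -- q in the old pool of this id class: contradiction with strict improvement
                  have h1 : pvLt ((x, (xs.length : Int)) : (List (String × Int)) × Int) q :=
                    hwlt q hq hid
                  rcases hmin (x, (xs.length : Int))
                      (List.mem_append_right _ List.mem_cons_self) hid.symm with rfl | h2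
                  · exact (pvLt_asymm h1 h1).elim
                  · exact absurd h2 (fun h => pvLt_asymm h1 h)
                · rw [List.mem_singleton.mp hq]
            · rw [if_neg hk, hsome k q]
              constructor
              · rintro ⟨hid, hmem, hmin⟩
                refine ⟨hid, List.mem_append_left _ hmem, ?_⟩
                intro r hr hid'
                rcases List.mem_append.mp hr with hr | hr
                · exact hmin r hr hid'
                · rw [List.mem_singleton.mp hr] at hid'
                  exact absurd (hid.symm.trans hid'.symm) hk
              · rintro ⟨hid, hmem, hmin⟩
                rcases List.mem_append.mp hmem with hq | hq
                · exact ⟨hid, hq, fun r hr hid' => hmin r (List.mem_append_left _ hr) hid'⟩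
                · rw [List.mem_singleton.mp hq] at hid
                  exact absurd hid.symm hk
          · intro k
            rw [PySem.Dict.get?_insert]
            by_cases hk : k = pvId x
            · subst hk
              rw [if_pos rfl]
              constructor
              · intro h; cases h
              · intro h
                exact absurd rfl (h (x, (xs.length : Int)) (List.mem_append_right _ List.mem_cons_self))
            · rw [if_neg hk, hnone k]
              constructor
              · intro h r hr
                rcases List.mem_append.mp hr with hr | hr
                · exact h r hr
                · rw [List.mem_singleton.mp hr]
                  exact fun he => hk he.symm
              · intro h r hr
                exact h r (List.mem_append_left _ hr)
        · -- keep the stored entry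
          have hstep : pvStep m (pvBest xs m) ((xs.length : Int), x) = pvBest xs m := by
            simp [pvStep, hlt, hc, hgt]
          have hcw : pvLt cur ((x, (xs.length : Int)) : (List (String × Int)) × Int) := by
            simp only [pvLt]
            simp only [gt_iff_lt, not_lt] at hgt
            rcases lt_or_eq_of_le hgt with h | h
            · exact Or.inl h
            · exact Or.inr ⟨h.symm, hcl⟩
          rw [hstep]
          refine ⟨hnd, ?_, ?_⟩
          · intro k q
            rw [hsome k q]
            by_cases hk : k = pvId x
            · subst hk
              constructor
              · rintro ⟨hid, hmem, hmin⟩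
                have hqc : q = cur := by
                  have := (hsome (pvId x) cur).mp hc
                  -- q and cur are both minima of the same class in pvW xs
                  rcases hcmin q hmem (hid.trans hcid.symm) with h | h
                  · exact h.symm
                  · rcases hmin cur hcmem (hcid.trans hid.symm) with h' | h'
                    · exact h'
                    · exact absurd h (fun hh => pvLt_asymm hh h')
                refine ⟨hid, List.mem_append_left _ hmem, ?_⟩
                intro r hr hid'
                rcases List.mem_append.mp hr with hr | hr
                · exact hmin r hr hid'
                · rw [List.mem_singleton.mp hr]
                  exact Or.inr (hqc ▸ hcw)
              · rintro ⟨hid, hmem, hmin⟩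
                rcases List.mem_append.mp hmem with hq | hq
                · exact ⟨hid, hq, fun r hr hid' => hmin r (List.mem_append_left _ hr) hid'⟩
                · -- q cannot be the new pair: cur beats it
                  have hq' : q = (x, (xs.length : Int)) := List.mem_singleton.mp hq
                  subst hq'
                  rcases hmin cur (List.mem_append_left _ hcmem) (hcid.trans hid.symm) with h | h
                  · exact absurd (congrArg Prod.snd h.symm) (by simp; omega)
                  · exact absurd h (fun hh => pvLt_asymm hcw hh)
            · constructor
              · rintro ⟨hid, hmem, hmin⟩
                refine ⟨hid, List.mem_append_left _ hmem, ?_⟩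
                intro r hr hid'
                rcases List.mem_append.mp hr with hr | hr
                · exact hmin r hr hid'
                · rw [List.mem_singleton.mp hr] at hid'
                  exact absurd (hid.symm.trans hid'.symm) hk
              · rintro ⟨hid, hmem, hmin⟩
                rcases List.mem_append.mp hmem with hq | hq
                · exact ⟨hid, hq, fun r hr hid' => hmin r (List.mem_append_left _ hr) hid'⟩
                · rw [List.mem_singleton.mp hq] at hid
                  exact absurd hid.symm hk
          · intro k
            rw [hnone k]
            by_cases hk : k = pvId x
            · subst hk
              constructor
              · intro h
                exact absurd hcid (h cur hcmem)
              · intro h r hr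
                exact h r (List.mem_append_left _ hr)
            · constructor
              · intro h r hr
                rcases List.mem_append.mp hr with hr | hr
                · exact h r hr
                · rw [List.mem_singleton.mp hr]
                  exact fun he => hk he.symm
              · intro h r hr
                exact h r (List.mem_append_left _ hr)

-- membership in values
theorem mem_values_iff (d : PySem.Dict Int ((List (String × Int)) × Int)) (hnd : d.keys.Nodup)
    (q : (List (String × Int)) × Int) :
    q ∈ d.values ↔ ∃ k, d.get? k = some q := by
  constructor
  · intro hq
    simp only [PySem.Dict.values, List.mem_map] at hq
    rcases hq with ⟨⟨k, v⟩, hmem, rfl⟩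
    exact ⟨k, PySem.Dict.get?_of_mem_items d hmem hnd⟩
  · rintro ⟨k, hk⟩
    have := PySem.Dict.mem_items_of_get?_eq_some d hk
    simp only [PySem.Dict.values, List.mem_map]
    exact ⟨(k, q), this, rfl⟩

-- ===== VERDICT (by name: the statement is the Claim_ definition above) =====
theorem filter_and_dedup_c_lex_py_spec : Claim_equal_filter_and_dedup_c_lex_py := by
  intro items m _ _
  unfold Spec_filter_and_dedup_c_lex_py
  rcases best_inv m items with ⟨hnd, hsome, hnone⟩
  have hndW := pvW_snd_nodup items m
  have hTperm : (pvT items m).Perm (pvW items m) := PySem.List.sorted2_perm _ _ _ _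
  have hTpair : (pvT items m).Pairwise pvLt := sorted2_pairwise' _ hndW
  have hTsnd : ((pvT items m).map Prod.snd).Nodup := ((hTperm.map Prod.snd).nodup_iff).mpr hndW
  have hTnd : (pvT items m).Nodup := List.Nodup.of_map Prod.snd hTsnd
  have hYsub := dedupP_sublist (pvT items m) PySem.Set.empty
  have hYpair : (pvDedupP PySem.Set.empty (pvT items m)).Pairwise pvLt := hTpair.sublist hYsub
  have hYnd : (pvDedupP PySem.Set.empty (pvT items m)).Nodup := hTnd.sublist hYsub
  have memV : ∀ q, q ∈ PySem.Dict.values (pvBest items m) ↔ pvGood items m q := by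
    intro q
    rw [mem_values_iff _ hnd q]
    constructor
    · rintro ⟨k, hk⟩; exact ((hsome k q).mp hk).2
    · intro hg; exact ⟨pvId q.1, (hsome (pvId q.1) q).mpr ⟨rfl, hg⟩⟩
  have memY : ∀ q, q ∈ pvDedupP PySem.Set.empty (pvT items m) ↔ pvGood items m q := by
    intro q
    rw [mem_dedupP _ _ hTpair q]
    unfold pvGood
    constructor
    · rintro ⟨hmem, -, hmin⟩
      exact ⟨hTperm.mem_iff.mp hmem, fun r hr => hmin r (hTperm.mem_iff.mpr hr)⟩
    · rintro ⟨hmem, hmin⟩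
      exact ⟨hTperm.mem_iff.mpr hmem, by simp [PySem.Set.empty],
        fun r hr => hmin r (hTperm.mem_iff.mp hr)⟩
  have hVnd : (PySem.Dict.values (pvBest items m)).Nodup := by
    rw [PySem.Dict.values_eq_map_keys _ hnd (([], 0))]
    refine List.Nodup.map_on ?_ hnd
    intro k1 hk1 k2 hk2 he
    obtain ⟨v1, h1⟩ : ∃ v, (pvBest items m).get? k1 = some v := by
      have hco : (pvBest items m).contains k1 = true :=
        (PySem.Dict.contains_iff_mem_keys _ _).mpr hk1
      rw [PySem.Dict.contains_eq_isSome_get?] at hco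
      cases h : (pvBest items m).get? k1 with
      | none => rw [h] at hco; cases hco
      | some v => exact ⟨v, rfl⟩
    obtain ⟨v2, h2⟩ : ∃ v, (pvBest items m).get? k2 = some v := by
      have hco : (pvBest items m).contains k2 = true :=
        (PySem.Dict.contains_iff_mem_keys _ _).mpr hk2
      rw [PySem.Dict.contains_eq_isSome_get?] at hco
      cases h : (pvBest items m).get? k2 with
      | none => rw [h] at hco; cases hco
      | some v => exact ⟨v, rfl⟩
    have e1 := PySem.Dict.getD_of_get?_eq_some _ (([], 0)) h1
    have e2 := PySem.Dict.getD_of_get?_eq_some _ (([], 0)) h2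
    have hv : v1 = v2 := by rw [← e1, ← e2, he]
    rcases (hsome k1 v1).mp h1 with ⟨hid1, -⟩
    rcases (hsome k2 v2).mp h2 with ⟨hid2, -⟩
    rw [← hid1, ← hid2, hv]
  have hWinj := map_nodup_inj Prod.snd (pvW items m) hndW
  have hVsnd : ((PySem.Dict.values (pvBest items m)).map Prod.snd).Nodup := by
    refine List.Nodup.map_on ?_ hVnd
    intro q hq r hr he
    exact hWinj q ((memV q).mp hq).1 r ((memV r).mp hr).1 he
  have hSVpair := sorted2_pairwise' _ hVsnd
  have hSVperm : (PySem.List.sorted2 (PySem.Dict.values (pvBest items m))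
      (fun q => -(pvN q.1)) (fun q => q.2) false).Perm (PySem.Dict.values (pvBest items m)) :=
    PySem.List.sorted2_perm _ _ _ _
  have hVY : (PySem.Dict.values (pvBest items m)).Perm (pvDedupP PySem.Set.empty (pvT items m)) :=
    (List.perm_ext_iff_of_nodup hVnd hYnd).mpr (fun q => (memV q).trans (memY q).symm)
  have hkey : PySem.List.sorted2 (PySem.Dict.values (pvBest items m))
      (fun q => -(pvN q.1)) (fun q => q.2) false = pvDedupP PySem.Set.empty (pvT items m) :=
    eq_of_perm_pairwise _ _ (hSVperm.trans hVY) hSVpair hYpair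
  have hA : filter_and_dedup_c_lex_py items m =
      pvDedup PySem.Set.empty
        (PySem.List.sorted (items.filter (pvPass m)) (fun x => -(pvN x)) false) := by
    simp only [filter_and_dedup_c_lex_py]
    rw [A_fold]
    rfl
  have hB : filter_and_dedup_c_lex_py_alt items m =
      (PySem.List.sorted2 (PySem.Dict.values (pvBest items m))
        (fun q => -(pvN q.1)) (fun q => q.2) false).map Prod.fst := rfl
  rw [hA, hB, ← map_fst_T, dedup_map, hkey]
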